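-- pv_equiv track=rewrite | github.com/Dragoon4002/artic-trader | clients/telegram/formatter.py | format_log_summary
-- ===== SOURCE A (Python) =====
-- def format_log_summary(logs: list) -> str:
--     """Summarize logs — never expose raw content."""
--     actions = sum(1 for l in logs if l.get("level") in ("action", "sl_tp"))
--     errors = sum(1 for l in logs if l.get("level") == "error")
--     supervisor = sum(1 for l in logs if l.get("level") == "supervisor")
--     return (
--         f"📊 Log Summary ({len(logs)} entries)\n"
--         f"  Actions: {actions}\n"
--         f"  Supervisor: {supervisor}\n"
--         f"  Errors: {errors}"
--     )
-- ===== SOURCE B (Python) =====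
-- def format_log_summary(logs: list) -> str:
--     """Summarize logs — never expose raw content."""
--     counts = {}
--     for l in logs:
--         lv = l.get("level")
--         counts[lv] = counts.get(lv, 0) + 1
--     actions = counts.get("action", 0) + counts.get("sl_tp", 0)
--     return (
--         f"📊 Log Summary ({len(logs)} entries)\n"
--         f"  Actions: {actions}\n"
--         f"  Supervisor: {counts.get('supervisor', 0)}\n"
--         f"  Errors: {counts.get('error', 0)}"
--     )
-- ===== Notes on version B (the rewrite author's own statement) =====
-- stated objective: alternative
-- what changed: Replaces A's three separate scans over the log list by one pass that builds a frequency table of levels, from which the three summary numbers are read off by constant-time lookups.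
import Mathlib
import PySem

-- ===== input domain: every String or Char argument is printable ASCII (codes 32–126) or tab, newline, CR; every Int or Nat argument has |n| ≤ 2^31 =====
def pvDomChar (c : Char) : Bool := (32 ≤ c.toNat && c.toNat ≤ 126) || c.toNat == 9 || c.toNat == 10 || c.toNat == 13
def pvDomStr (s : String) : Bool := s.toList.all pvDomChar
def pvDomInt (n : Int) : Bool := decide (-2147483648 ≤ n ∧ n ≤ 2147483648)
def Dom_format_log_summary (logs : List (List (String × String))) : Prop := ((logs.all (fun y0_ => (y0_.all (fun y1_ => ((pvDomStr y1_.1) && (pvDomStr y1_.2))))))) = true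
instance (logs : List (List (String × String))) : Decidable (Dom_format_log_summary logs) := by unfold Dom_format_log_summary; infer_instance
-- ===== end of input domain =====

-- B replaces A's three scans over the logs by one counting pass plus constant lookups; return value only, no mutation.

-- l.get("level") on the dict l (lookup = first match on the association list)
def pvLevel (l : List (String × String)) : Option String :=
  (PySem.Dict.mk l).get? "level"

-- ===== PORT A =====
def format_log_summary (logs : List (List (String × String))) : String :=
  let actions := logs.foldl
    (fun acc l => if pvLevel l = some "action" ∨ pvLevel l = some "sl_tp" then acc + 1 else acc) (0 : Int)
  let errors := logs.foldl
    (fun acc l => if pvLevel l = some "error" then acc + 1 else acc) (0 : Int)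
  let supervisor := logs.foldl
    (fun acc l => if pvLevel l = some "supervisor" then acc + 1 else acc) (0 : Int)
  "📊 Log Summary (" ++ PySem.Int.toStr (logs.length : Int) ++ " entries)\n" ++
  "  Actions: " ++ PySem.Int.toStr actions ++ "\n" ++
  "  Supervisor: " ++ PySem.Int.toStr supervisor ++ "\n" ++
  "  Errors: " ++ PySem.Int.toStr errors

-- ===== PORT B =====
def format_log_summary_alt (logs : List (List (String × String))) : String :=
  let counts := logs.foldl
    (fun d l => let lv := pvLevel l; d.insert lv (d.getD lv 0 + 1))
    (PySem.Dict.empty : PySem.Dict (Option String) Int)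
  let actions := counts.getD (some "action") 0 + counts.getD (some "sl_tp") 0
  "📊 Log Summary (" ++ PySem.Int.toStr (logs.length : Int) ++ " entries)\n" ++
  "  Actions: " ++ PySem.Int.toStr actions ++ "\n" ++
  "  Supervisor: " ++ PySem.Int.toStr (counts.getD (some "supervisor") 0) ++ "\n" ++
  "  Errors: " ++ PySem.Int.toStr (counts.getD (some "error") 0)

-- ===== PRECONDITION & SPEC =====
def Spec_format_log_summary (logs : List (List (String × String))) (out : String) : Prop := out = format_log_summary_alt logs
instance (logs : List (List (String × String))) (out : String) : Decidable (Spec_format_log_summary logs out) := by unfold Spec_format_log_summary; infer_instance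

-- ===== CLAIM (what is proved, stated in full; the proofs are below) =====
def Claim_equal_format_log_summary : Prop := ∀ (logs : List (List (String × String))), Dom_format_log_summary logs → Spec_format_log_summary logs (format_log_summary logs)

-- ===== LEMMAS AND PROOFS =====

-- B's counting loop, read at key v, is the count of v among the levels
theorem pv_counts_getD (logs : List (List (String × String))) (v : Option String) :
    (logs.foldl (fun d l => let lv := pvLevel l; d.insert lv (d.getD lv 0 + 1))
      (PySem.Dict.empty : PySem.Dict (Option String) Int)).getD v 0
    = ((logs.map pvLevel).count v : Int) := by
  rw [← List.foldl_map (f := pvLevel)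
        (g := fun (d : PySem.Dict (Option String) Int) lv => d.insert lv (d.getD lv 0 + 1)),
      PySem.Dict.getD_foldl_insert_add_one, PySem.Dict.getD_empty]
  simp

-- A's actions loop counts two disjoint levels at once
theorem pv_actions_eq (logs : List (List (String × String))) :
    logs.foldl (fun acc l => if pvLevel l = some "action" ∨ pvLevel l = some "sl_tp" then acc + 1 else acc) (0 : Int)
    = ((logs.map pvLevel).count (some "action") : Int) + ((logs.map pvLevel).count (some "sl_tp") : Int) := by
  rw [PySem.List.foldl_ite_add_one]
  induction logs with
  | nil => simp
  | cons x xs ih =>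
    simp only [List.countP_cons, List.map_cons, List.count_cons]
    by_cases h1 : pvLevel x = some "action" <;> by_cases h2 : pvLevel x = some "sl_tp" <;>
      simp_all <;> omega

theorem pv_count_eq (logs : List (List (String × String))) (v : Option String) :
    logs.foldl (fun acc l => if pvLevel l = v then acc + 1 else acc) (0 : Int)
    = ((logs.map pvLevel).count v : Int) := by
  rw [PySem.List.foldl_ite_add_one]
  simp only [List.count, List.countP_map, Function.comp_def, zero_add, Nat.cast_inj]
  exact List.countP_congr (fun a _ => by simp)

-- ===== VERDICT (by name: the statement is the Claim_ definition above) =====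
theorem format_log_summary_spec : Claim_equal_format_log_summary := by
  intro logs _
  unfold Spec_format_log_summary format_log_summary format_log_summary_alt
  simp only [pv_counts_getD, pv_count_eq, pv_actions_eq]
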